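-- pv_equiv track=rewrite | github.com/pranaysoyam1265/ResumeAnalyzer | VercelNext.js version/VercelNext.js version/scripts/data_collector.py | _create_column_mapping
-- ===== SOURCE A (Python) =====
-- def _create_column_mapping(columns):
--     """Create mapping from standardized names to actual column names."""
--     mapping = {
--         'title': [],
--         'description': [],
--         'skills': [],
--         'platform': [],
--         'duration': [],
--         'level': [],
--         'rating': [],
--         'price': []
--     }
--
--     for col in columns:
--         col_lower = col.lower()
--         if any(word in col_lower for word in ['title', 'name', 'course']):
--             mapping['title'].append(col)
--         elif any(word in col_lower for word in ['description', 'summary', 'overview']):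
--             mapping['description'].append(col)
--         elif any(word in col_lower for word in ['skill', 'tag', 'subject', 'category']):
--             mapping['skills'].append(col)
--         elif any(word in col_lower for word in ['platform', 'provider', 'site', 'source']):
--             mapping['platform'].append(col)
--         elif any(word in col_lower for word in ['duration', 'length', 'time']):
--             mapping['duration'].append(col)
--         elif any(word in col_lower for word in ['level', 'difficulty']):
--             mapping['level'].append(col)
--         elif any(word in col_lower for word in ['rating', 'score', 'review']):
--             mapping['rating'].append(col)
--         elif any(word in col_lower for word in ['price', 'cost', 'fee']):
--             mapping['price'].append(col)
--
--     return mapping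
-- ===== SOURCE B (Python) =====
-- _TABLE = [
--     ('title', ('title', 'name', 'course')),
--     ('description', ('description', 'summary', 'overview')),
--     ('skills', ('skill', 'tag', 'subject', 'category')),
--     ('platform', ('platform', 'provider', 'site', 'source')),
--     ('duration', ('duration', 'length', 'time')),
--     ('level', ('level', 'difficulty')),
--     ('rating', ('rating', 'score', 'review')),
--     ('price', ('price', 'cost', 'fee')),
-- ]
--
--
-- def _classify(col_lower):
--     """Index of the first category whose keywords match, or -1."""
--     for i, (_, words) in enumerate(_TABLE):
--         if any(word in col_lower for word in words):
--             return i
--     return -1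
--
--
-- def _create_column_mapping(columns):
--     """Create mapping from standardized names to actual column names."""
--     classes = [_classify(col.lower()) for col in columns]
--     return {key: [col for col, k in zip(columns, classes) if k == i]
--             for i, (key, _) in enumerate(_TABLE)}
-- ===== Notes on version B (the rewrite author's own statement) =====
-- stated objective: idiomatic
-- what changed: Replaces the 8-branch elif ladder with a data-driven keyword table: each column is classified once by the first matching category index, and the mapping is built category-by-category as a filter over the classified columns instead of dispatch-and-append per column.
import Mathlib
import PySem

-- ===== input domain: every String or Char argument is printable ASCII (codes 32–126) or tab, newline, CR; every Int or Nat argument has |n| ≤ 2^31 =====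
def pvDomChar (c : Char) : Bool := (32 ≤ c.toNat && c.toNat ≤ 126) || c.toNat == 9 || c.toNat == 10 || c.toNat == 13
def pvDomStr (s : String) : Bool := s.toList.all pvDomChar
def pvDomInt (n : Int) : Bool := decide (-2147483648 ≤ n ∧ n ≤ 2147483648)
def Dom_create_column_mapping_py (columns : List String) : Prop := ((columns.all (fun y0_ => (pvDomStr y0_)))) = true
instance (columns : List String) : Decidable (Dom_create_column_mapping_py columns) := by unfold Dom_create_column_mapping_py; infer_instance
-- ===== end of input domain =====

-- B replaces the elif ladder with a keyword table: classify each column once, then build the dict per category by filtering; same behaviour, data-driven (objective: idiomatic).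

-- ===== PORT A =====
-- any(word in col_lower for word in ws)
def pvAny (ws : List String) (cl : String) : Bool := ws.any (fun w => PySem.Str.isIn w cl)

def create_column_mapping_py (columns : List String) : List (String × List String) :=
  let init : PySem.Dict String (List String) := PySem.Dict.mk
    [("title", []), ("description", []), ("skills", []), ("platform", []),
     ("duration", []), ("level", []), ("rating", []), ("price", [])]
  (columns.foldl (fun m col =>
    let cl := PySem.Str.lower col
    if pvAny ["title", "name", "course"] cl then m.modify "title" [] (· ++ [col])
    else if pvAny ["description", "summary", "overview"] cl then m.modify "description" [] (· ++ [col])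
    else if pvAny ["skill", "tag", "subject", "category"] cl then m.modify "skills" [] (· ++ [col])
    else if pvAny ["platform", "provider", "site", "source"] cl then m.modify "platform" [] (· ++ [col])
    else if pvAny ["duration", "length", "time"] cl then m.modify "duration" [] (· ++ [col])
    else if pvAny ["level", "difficulty"] cl then m.modify "level" [] (· ++ [col])
    else if pvAny ["rating", "score", "review"] cl then m.modify "rating" [] (· ++ [col])
    else if pvAny ["price", "cost", "fee"] cl then m.modify "price" [] (· ++ [col])
    else m) init).items

-- ===== PORT B =====
def pvTable : List (String × List String) :=
  [("title", ["title", "name", "course"]),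
   ("description", ["description", "summary", "overview"]),
   ("skills", ["skill", "tag", "subject", "category"]),
   ("platform", ["platform", "provider", "site", "source"]),
   ("duration", ["duration", "length", "time"]),
   ("level", ["level", "difficulty"]),
   ("rating", ["rating", "score", "review"]),
   ("price", ["price", "cost", "fee"])]

-- _classify: loop with early return → structural recursion over the table rows
def pvClassifyAux (cl : String) : List (String × List String) → Int → Int
  | [], _ => -1
  | (_, ws) :: rest, i => if pvAny ws cl then i else pvClassifyAux cl rest (i + 1)

def pvClassify (cl : String) : Int := pvClassifyAux cl pvTable 0

def create_column_mapping_py_alt (columns : List String) : List (String × List String) :=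
  let classes := columns.map (fun col => pvClassify (PySem.Str.lower col))
  (PySem.List.enumerate pvTable).map (fun p =>
    (p.2.1, ((columns.zip classes).filter (fun q => q.2 == p.1)).map (·.1)))

-- ===== PRECONDITION & SPEC =====
def Spec_create_column_mapping_py (columns : List String) (out : List (String × List String)) : Prop := out = create_column_mapping_py_alt columns
instance (columns : List String) (out : List (String × List String)) : Decidable (Spec_create_column_mapping_py columns out) := by unfold Spec_create_column_mapping_py; infer_instance

-- ===== CLAIM (what is proved, stated in full; the proofs are below) =====
def Claim_equal_create_column_mapping_py : Prop := ∀ (columns : List String), Dom_create_column_mapping_py columns → Spec_create_column_mapping_py columns (create_column_mapping_py columns)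

-- ===== LEMMAS AND PROOFS =====

-- zip a list with its own map, filter on the second component, project the first = plain filter
theorem pv_zip_map_filter (g : String → Int) (i : Int) :
    ∀ (cols : List String),
      ((cols.zip (cols.map g)).filter (fun q => q.2 == i)).map (·.1)
        = cols.filter (fun c => g c == i) := by
  intro cols
  induction cols with
  | nil => rfl
  | cons c cs ih =>
      simp only [List.map_cons, List.zip_cons_cons, List.filter_cons]
      by_cases h : g c == i
      · simp [h, ih]
      · simp [h, ih]

def pvFilt (i : Int) (cols : List String) : List String :=
  cols.filter (fun c => pvClassify (PySem.Str.lower c) == i)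

theorem pv_alt_eq (cols : List String) :
    create_column_mapping_py_alt cols =
      [("title", pvFilt 0 cols), ("description", pvFilt 1 cols), ("skills", pvFilt 2 cols),
       ("platform", pvFilt 3 cols), ("duration", pvFilt 4 cols), ("level", pvFilt 5 cols),
       ("rating", pvFilt 6 cols), ("price", pvFilt 7 cols)] := by
  simp only [create_column_mapping_py_alt, pvTable, PySem.List.enumerate, pvFilt,
    pv_zip_map_filter, List.map_cons, List.map_nil]
  rfl

theorem pvMod0 (l0 l1 l2 l3 l4 l5 l6 l7 : List String) (f : List String → List String) :
    (PySem.Dict.mk [("title", l0), ("description", l1), ("skills", l2), ("platform", l3), ("duration", l4), ("level", l5), ("rating", l6), ("price", l7)]).modify "title" [] f = PySem.Dict.mk [("title", f l0), ("description", l1), ("skills", l2), ("platform", l3), ("duration", l4), ("level", l5), ("rating", l6), ("price", l7)] := rfl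

theorem pvMod1 (l0 l1 l2 l3 l4 l5 l6 l7 : List String) (f : List String → List String) :
    (PySem.Dict.mk [("title", l0), ("description", l1), ("skills", l2), ("platform", l3), ("duration", l4), ("level", l5), ("rating", l6), ("price", l7)]).modify "description" [] f = PySem.Dict.mk [("title", l0), ("description", f l1), ("skills", l2), ("platform", l3), ("duration", l4), ("level", l5), ("rating", l6), ("price", l7)] := rfl

theorem pvMod2 (l0 l1 l2 l3 l4 l5 l6 l7 : List String) (f : List String → List String) :
    (PySem.Dict.mk [("title", l0), ("description", l1), ("skills", l2), ("platform", l3), ("duration", l4), ("level", l5), ("rating", l6), ("price", l7)]).modify "skills" [] f = PySem.Dict.mk [("title", l0), ("description", l1), ("skills", f l2), ("platform", l3), ("duration", l4), ("level", l5), ("rating", l6), ("price", l7)] := rfl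

theorem pvMod3 (l0 l1 l2 l3 l4 l5 l6 l7 : List String) (f : List String → List String) :
    (PySem.Dict.mk [("title", l0), ("description", l1), ("skills", l2), ("platform", l3), ("duration", l4), ("level", l5), ("rating", l6), ("price", l7)]).modify "platform" [] f = PySem.Dict.mk [("title", l0), ("description", l1), ("skills", l2), ("platform", f l3), ("duration", l4), ("level", l5), ("rating", l6), ("price", l7)] := rfl

theorem pvMod4 (l0 l1 l2 l3 l4 l5 l6 l7 : List String) (f : List String → List String) :
    (PySem.Dict.mk [("title", l0), ("description", l1), ("skills", l2), ("platform", l3), ("duration", l4), ("level", l5), ("rating", l6), ("price", l7)]).modify "duration" [] f = PySem.Dict.mk [("title", l0), ("description", l1), ("skills", l2), ("platform", l3), ("duration", f l4), ("level", l5), ("rating", l6), ("price", l7)] := rfl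

theorem pvMod5 (l0 l1 l2 l3 l4 l5 l6 l7 : List String) (f : List String → List String) :
    (PySem.Dict.mk [("title", l0), ("description", l1), ("skills", l2), ("platform", l3), ("duration", l4), ("level", l5), ("rating", l6), ("price", l7)]).modify "level" [] f = PySem.Dict.mk [("title", l0), ("description", l1), ("skills", l2), ("platform", l3), ("duration", l4), ("level", f l5), ("rating", l6), ("price", l7)] := rfl

theorem pvMod6 (l0 l1 l2 l3 l4 l5 l6 l7 : List String) (f : List String → List String) :
    (PySem.Dict.mk [("title", l0), ("description", l1), ("skills", l2), ("platform", l3), ("duration", l4), ("level", l5), ("rating", l6), ("price", l7)]).modify "rating" [] f = PySem.Dict.mk [("title", l0), ("description", l1), ("skills", l2), ("platform", l3), ("duration", l4), ("level", l5), ("rating", f l6), ("price", l7)] := rfl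

theorem pvMod7 (l0 l1 l2 l3 l4 l5 l6 l7 : List String) (f : List String → List String) :
    (PySem.Dict.mk [("title", l0), ("description", l1), ("skills", l2), ("platform", l3), ("duration", l4), ("level", l5), ("rating", l6), ("price", l7)]).modify "price" [] f = PySem.Dict.mk [("title", l0), ("description", l1), ("skills", l2), ("platform", l3), ("duration", l4), ("level", l5), ("rating", l6), ("price", f l7)] := rfl

theorem pv_a_loop (cols : List String) :
    ∀ (l0 l1 l2 l3 l4 l5 l6 l7 : List String),
      (cols.foldl (fun m col =>
        if pvAny ["title", "name", "course"] (PySem.Str.lower col) then m.modify "title" [] (· ++ [col])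
        else if pvAny ["description", "summary", "overview"] (PySem.Str.lower col) then m.modify "description" [] (· ++ [col])
        else if pvAny ["skill", "tag", "subject", "category"] (PySem.Str.lower col) then m.modify "skills" [] (· ++ [col])
        else if pvAny ["platform", "provider", "site", "source"] (PySem.Str.lower col) then m.modify "platform" [] (· ++ [col])
        else if pvAny ["duration", "length", "time"] (PySem.Str.lower col) then m.modify "duration" [] (· ++ [col])
        else if pvAny ["level", "difficulty"] (PySem.Str.lower col) then m.modify "level" [] (· ++ [col])
        else if pvAny ["rating", "score", "review"] (PySem.Str.lower col) then m.modify "rating" [] (· ++ [col])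
        else if pvAny ["price", "cost", "fee"] (PySem.Str.lower col) then m.modify "price" [] (· ++ [col])
        else m)
        (PySem.Dict.mk [("title", l0), ("description", l1), ("skills", l2), ("platform", l3), ("duration", l4), ("level", l5), ("rating", l6), ("price", l7)])).items
      = [("title", l0 ++ pvFilt 0 cols), ("description", l1 ++ pvFilt 1 cols), ("skills", l2 ++ pvFilt 2 cols), ("platform", l3 ++ pvFilt 3 cols), ("duration", l4 ++ pvFilt 4 cols), ("level", l5 ++ pvFilt 5 cols), ("rating", l6 ++ pvFilt 6 cols), ("price", l7 ++ pvFilt 7 cols)] := by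
  induction cols with
  | nil =>
      intro l0 l1 l2 l3 l4 l5 l6 l7
      simp [pvFilt, PySem.Dict.items]
  | cons c cs ih =>
      intro l0 l1 l2 l3 l4 l5 l6 l7
      simp only [List.foldl_cons]
      by_cases h0 : pvAny ["title", "name", "course"] (PySem.Str.lower c) = true
      · have hc : pvClassify (PySem.Str.lower c) = 0 := by
          simp [pvClassify, pvTable, pvClassifyAux, h0]
        simp only [h0, if_true, if_false, ite_true, ite_false, eq_self_iff_true, not_false_eq_true, Bool.false_eq_true]
        rw [pvMod0, ih]
        simp [pvFilt, List.filter_cons, hc]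
      by_cases h1 : pvAny ["description", "summary", "overview"] (PySem.Str.lower c) = true
      · have hc : pvClassify (PySem.Str.lower c) = 1 := by
          simp [pvClassify, pvTable, pvClassifyAux, h0, h1]
        simp only [h0, h1, if_true, if_false, ite_true, ite_false, eq_self_iff_true, not_false_eq_true, Bool.false_eq_true]
        rw [pvMod1, ih]
        simp [pvFilt, List.filter_cons, hc]
      by_cases h2 : pvAny ["skill", "tag", "subject", "category"] (PySem.Str.lower c) = true
      · have hc : pvClassify (PySem.Str.lower c) = 2 := by
          simp [pvClassify, pvTable, pvClassifyAux, h0, h1, h2]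
        simp only [h0, h1, h2, if_true, if_false, ite_true, ite_false, eq_self_iff_true, not_false_eq_true, Bool.false_eq_true]
        rw [pvMod2, ih]
        simp [pvFilt, List.filter_cons, hc]
      by_cases h3 : pvAny ["platform", "provider", "site", "source"] (PySem.Str.lower c) = true
      · have hc : pvClassify (PySem.Str.lower c) = 3 := by
          simp [pvClassify, pvTable, pvClassifyAux, h0, h1, h2, h3]
        simp only [h0, h1, h2, h3, if_true, if_false, ite_true, ite_false, eq_self_iff_true, not_false_eq_true, Bool.false_eq_true]
        rw [pvMod3, ih]
        simp [pvFilt, List.filter_cons, hc]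
      by_cases h4 : pvAny ["duration", "length", "time"] (PySem.Str.lower c) = true
      · have hc : pvClassify (PySem.Str.lower c) = 4 := by
          simp [pvClassify, pvTable, pvClassifyAux, h0, h1, h2, h3, h4]
        simp only [h0, h1, h2, h3, h4, if_true, if_false, ite_true, ite_false, eq_self_iff_true, not_false_eq_true, Bool.false_eq_true]
        rw [pvMod4, ih]
        simp [pvFilt, List.filter_cons, hc]
      by_cases h5 : pvAny ["level", "difficulty"] (PySem.Str.lower c) = true
      · have hc : pvClassify (PySem.Str.lower c) = 5 := by
          simp [pvClassify, pvTable, pvClassifyAux, h0, h1, h2, h3, h4, h5]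
        simp only [h0, h1, h2, h3, h4, h5, if_true, if_false, ite_true, ite_false, eq_self_iff_true, not_false_eq_true, Bool.false_eq_true]
        rw [pvMod5, ih]
        simp [pvFilt, List.filter_cons, hc]
      by_cases h6 : pvAny ["rating", "score", "review"] (PySem.Str.lower c) = true
      · have hc : pvClassify (PySem.Str.lower c) = 6 := by
          simp [pvClassify, pvTable, pvClassifyAux, h0, h1, h2, h3, h4, h5, h6]
        simp only [h0, h1, h2, h3, h4, h5, h6, if_true, if_false, ite_true, ite_false, eq_self_iff_true, not_false_eq_true, Bool.false_eq_true]
        rw [pvMod6, ih]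
        simp [pvFilt, List.filter_cons, hc]
      by_cases h7 : pvAny ["price", "cost", "fee"] (PySem.Str.lower c) = true
      · have hc : pvClassify (PySem.Str.lower c) = 7 := by
          simp [pvClassify, pvTable, pvClassifyAux, h0, h1, h2, h3, h4, h5, h6, h7]
        simp only [h0, h1, h2, h3, h4, h5, h6, h7, if_true, if_false, ite_true, ite_false, eq_self_iff_true, not_false_eq_true, Bool.false_eq_true]
        rw [pvMod7, ih]
        simp [pvFilt, List.filter_cons, hc]
      · have hc : pvClassify (PySem.Str.lower c) = -1 := by
          simp [pvClassify, pvTable, pvClassifyAux, h0, h1, h2, h3, h4, h5, h6, h7]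
        simp only [h0, h1, h2, h3, h4, h5, h6, h7, if_false, ite_false, Bool.false_eq_true]
        rw [ih]
        simp [pvFilt, List.filter_cons, hc]


-- ===== VERDICT (by name: the statement is the Claim_ definition above) =====
theorem create_column_mapping_py_spec : Claim_equal_create_column_mapping_py := by
  intro cols _
  unfold Spec_create_column_mapping_py
  rw [pv_alt_eq]
  unfold create_column_mapping_py
  have := pv_a_loop cols [] [] [] [] [] [] [] []
  simpa using this
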